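-- pv_equiv track=rewrite | github.com/thangquang09/vietnamese-f5tts-voice-design | capspeech/nar/data_preprocessing/phonemize_vn.py | text_to_chars
-- ===== SOURCE A (Python) =====
-- def text_to_chars(text):
--     """Convert Vietnamese text to character-level tokens.
--
--     Space → <BLK>
--     Each character → individual token
--     Lowercase everything.
--     """
--     chars = []
--     for ch in text.lower():
--         if ch == ' ':
--             chars.append('<BLK>')
--         else:
--             chars.append(ch)
--     return chars
-- ===== SOURCE B (Python) =====
-- def text_to_chars(text):
--     """Convert text to char tokens: lowercase, split on ' ', explode each word
--     into characters and interleave a single '<BLK>' between consecutive words."""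
--     first, *rest = text.lower().split(' ')
--     out = list(first)
--     for word in rest:
--         out.append('<BLK>')
--         out.extend(word)
--     return out
-- ===== Notes on version B (the rewrite author's own statement) =====
-- stated objective: alternative
-- what changed: B lowercases the text, splits it on the space character, and rebuilds the token list by exploding each word into characters with a blank token interleaved between consecutive words, instead of A's per-character loop testing every char for equality with a space.
import Mathlib
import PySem

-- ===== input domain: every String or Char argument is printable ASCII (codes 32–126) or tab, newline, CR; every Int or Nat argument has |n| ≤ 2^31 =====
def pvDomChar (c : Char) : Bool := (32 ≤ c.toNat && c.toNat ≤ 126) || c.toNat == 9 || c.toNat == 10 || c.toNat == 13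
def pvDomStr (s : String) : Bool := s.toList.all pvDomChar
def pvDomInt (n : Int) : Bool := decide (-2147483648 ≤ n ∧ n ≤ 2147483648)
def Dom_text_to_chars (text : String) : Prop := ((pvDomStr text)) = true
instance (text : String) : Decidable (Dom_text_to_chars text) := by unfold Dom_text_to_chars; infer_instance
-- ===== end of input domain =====

-- B splits the lowercased text on ' ' and interleaves '<BLK>' between the exploded
-- words, instead of A's per-character loop testing each char against ' '.

-- ===== PORT A =====
-- for ch in text.lower(): chars.append('<BLK>' if ch==' ' else ch)
def text_to_chars (text : String) : List String :=
  (PySem.Str.lower text).toList.foldl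
    (fun chars ch => chars ++ [if ch == ' ' then "<BLK>" else String.ofList [ch]]) []

-- ===== PORT B =====
-- first, *rest = text.lower().split(' '); out = list(first); for w in rest: out += ['<BLK>'] + list(w)
def text_to_chars_alt (text : String) : List String :=
  match PySem.Chars.splitOn (PySem.Str.lower text).toList [' '] with
  | [] => []      -- unreachable: split(' ') always yields at least one piece
  | w :: ws =>
      ws.foldl (fun out w' => out ++ "<BLK>" :: w'.map (fun c => String.ofList [c]))
        (w.map (fun c => String.ofList [c]))

-- ===== PRECONDITION & SPEC =====
def Spec_text_to_chars (text : String) (out : List String) : Prop := out = text_to_chars_alt text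
instance (text : String) (out : List String) : Decidable (Spec_text_to_chars text out) := by unfold Spec_text_to_chars; infer_instance

-- ===== CLAIM (what is proved, stated in full; the proofs are below) =====
def Claim_equal_text_to_chars : Prop := ∀ (text : String), Dom_text_to_chars text → Spec_text_to_chars text (text_to_chars text)

-- ===== LEMMAS AND PROOFS =====

-- simple structural split-on-space, used to characterise PySem.Chars.splitOn … [' ']
def splitSp : List Char → List (List Char)
  | [] => [[]]
  | c :: rest =>
    if c = ' ' then [] :: splitSp rest
    else
      match splitSp rest with
      | w :: ws => (c :: w) :: ws
      | [] => [[c]]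

lemma splitSp_ne_nil (l : List Char) : splitSp l ≠ [] := by
  cases l with
  | nil => simp [splitSp]
  | cons c rest =>
    simp only [splitSp]
    split
    · simp
    · cases h : splitSp rest <;> simp

lemma splitOn_go_eq (l : List Char) : ∀ (fuel : Nat)
    (cur' : List Char) (acc' : List (List Char)), l.length ≤ fuel →
    PySem.Chars.splitOn.go [' '] fuel l cur' acc' =
      acc'.reverse ++
        (match splitSp l with
         | w :: ws => (cur'.reverse ++ w) :: ws
         | [] => []) := by
  induction l with
  | nil =>
    intro fuel cur' acc' _
    cases fuel <;> simp [PySem.Chars.splitOn.go, splitSp]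
  | cons c rest ih =>
    intro fuel cur' acc' hlen
    cases fuel with
    | zero => simp at hlen
    | succ fuel' =>
      simp only [List.length_cons] at hlen
      by_cases hc : c = ' '
      · subst hc
        have : ([' '].isPrefixOf (' ' :: rest)) = true := by simp [List.isPrefixOf]
        simp only [PySem.Chars.splitOn.go, this, List.length_singleton,
          List.drop_one, List.tail_cons]
        rw [ih fuel' [] (cur'.reverse :: acc') (by omega)]
        have hne := splitSp_ne_nil rest
        cases hs : splitSp rest with
        | nil => exact absurd hs hne
        | cons w ws => simp [splitSp, hs]
      · have hp : ([' '].isPrefixOf (c :: rest)) = false := by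
          simp [List.isPrefixOf]; exact fun h => absurd h.symm hc
        simp only [PySem.Chars.splitOn.go, hp, Bool.false_eq_true, if_false]
        rw [ih fuel' (c :: cur') acc' (by omega)]
        have hne := splitSp_ne_nil rest
        cases hs : splitSp rest with
        | nil => exact absurd hs hne
        | cons w ws => simp [splitSp, hs, hc]

lemma splitOn_eq_splitSp (l : List Char) :
    PySem.Chars.splitOn l [' '] = splitSp l := by
  show PySem.Chars.splitOn.go [' '] (l.length + 1) l [] [] = _
  rw [splitOn_go_eq l (l.length + 1) [] [] (by omega)]
  have hne := splitSp_ne_nil l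
  cases hs : splitSp l with
  | nil => exact absurd hs hne
  | cons w ws => simp

-- character-to-token map used on the A side
def tokOf (c : Char) : String := if c == ' ' then "<BLK>" else String.ofList [c]

def mkTok (w : List Char) : List String := w.map (fun c => String.ofList [c])

lemma map_tok_eq_interleave (l : List Char) :
    l.map tokOf =
      (match splitSp l with
       | w :: ws => mkTok w ++ ws.flatMap (fun w' => "<BLK>" :: mkTok w')
       | [] => []) := by
  induction l with
  | nil => simp [splitSp, mkTok]
  | cons c rest ih =>
    by_cases hc : c = ' '
    · subst hc
      have hne := splitSp_ne_nil rest
      cases hs : splitSp rest with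
      | nil => exact absurd hs hne
      | cons w ws =>
        simp only [splitSp, hs]
        simp only [List.map_cons, ih, hs]
        simp [tokOf, mkTok]
    · have hne := splitSp_ne_nil rest
      cases hs : splitSp rest with
      | nil => exact absurd hs hne
      | cons w ws =>
        simp only [splitSp, if_neg hc, hs]
        simp only [List.map_cons, ih, hs]
        simp [tokOf, mkTok, hc]

lemma foldl_blk (ws : List (List Char)) (a : List String) :
    ws.foldl (fun out w' => out ++ "<BLK>" :: mkTok w') a =
      a ++ ws.flatMap (fun w' => "<BLK>" :: mkTok w') := by
  induction ws generalizing a with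
  | nil => simp
  | cons w ws ih => simp [List.foldl_cons, ih]

-- ===== VERDICT (by name: the statement is the Claim_ definition above) =====
theorem text_to_chars_spec : Claim_equal_text_to_chars := by
  intro text _
  unfold Spec_text_to_chars text_to_chars text_to_chars_alt
  rw [PySem.List.foldl_append_singleton_eq_map]
  rw [splitOn_eq_splitSp]
  have hne := splitSp_ne_nil (PySem.Str.lower text).toList
  cases hs : splitSp (PySem.Str.lower text).toList with
  | nil => exact absurd hs hne
  | cons w ws =>
    show (PySem.Str.lower text).toList.map tokOf = _
    rw [map_tok_eq_interleave, hs]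
    show mkTok w ++ _ = ws.foldl (fun out w' => out ++ "<BLK>" :: mkTok w') (mkTok w)
    rw [foldl_blk]
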